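-- pv_equiv track=rewrite | github.com/Anderssorby/algdatH16 | oving11.py | pop_best
-- ===== SOURCE A (Python) =====
-- def pop_best(Q, nm, pm):
--     best = Q[0]
--     for i in Q:
--         for e in nm[i]:
--             if e == 1:
--                 if pm[best] < pm[i]:
--                     best = i
--
--     Q.remove(best)
--     return best
-- ===== SOURCE B (Python) =====
-- def pop_best(Q, nm, pm):
--     # Sort-then-pick: rank the candidates (nodes of Q whose row contains a 1) by
--     # descending priority with a stable sort, so ranked[0] is the FIRST candidate of
--     # maximal priority; it wins only if it strictly beats Q[0] (A's seeding rule).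
--     # Mutates Q (remove) like A.
--     ranked = sorted((i for i in Q if 1 in nm[i]), key=lambda x: -pm[x])
--     best = ranked[0] if ranked and pm[ranked[0]] > pm[Q[0]] else Q[0]
--     Q.remove(best)
--     return best
-- ===== Notes on version B (the rewrite author's own statement) =====
-- stated objective: alternative
-- what changed: A's fused nested running-max scan is replaced by sort-then-pick: stably sort the candidates (nodes whose row contains a 1) by descending priority and take the head, which wins only if it strictly beats Q[0].
import Mathlib
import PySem

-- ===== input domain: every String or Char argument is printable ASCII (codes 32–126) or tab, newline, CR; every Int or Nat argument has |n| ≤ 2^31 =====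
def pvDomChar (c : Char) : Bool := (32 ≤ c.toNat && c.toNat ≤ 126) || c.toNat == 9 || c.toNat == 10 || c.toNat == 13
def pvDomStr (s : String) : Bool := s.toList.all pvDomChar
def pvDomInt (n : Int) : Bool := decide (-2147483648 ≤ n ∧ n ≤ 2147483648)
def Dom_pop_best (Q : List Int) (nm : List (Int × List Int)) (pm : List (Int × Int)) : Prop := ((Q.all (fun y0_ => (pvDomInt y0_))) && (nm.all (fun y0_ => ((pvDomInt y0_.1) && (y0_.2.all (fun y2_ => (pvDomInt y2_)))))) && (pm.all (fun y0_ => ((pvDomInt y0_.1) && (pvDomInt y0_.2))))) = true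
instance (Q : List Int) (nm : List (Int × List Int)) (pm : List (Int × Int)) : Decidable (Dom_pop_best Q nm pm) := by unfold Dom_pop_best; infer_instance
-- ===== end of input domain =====

-- B replaces A's fused nested running-max scan by sort-then-pick: stably sort the candidates
-- by descending priority and take the head (which wins only if it strictly beats Q[0]).
-- Equivalence is about the RETURN value only: both Pythons mutate Q the same way (Q.remove(best)).

-- ===== PORT A =====
-- first-match lookup in an association list (Python dict lookup), with a default the
-- precondition makes unreachable
def lookupD {A : Type} (d : List (Int × A)) (k : Int) (dflt : A) : A := (d.lookup k).getD dflt

def pop_best (Q : List Int) (nm : List (Int × List Int)) (pm : List (Int × Int)) : Int :=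
  Q.foldl (fun best i =>
    (lookupD nm i []).foldl (fun best e =>
      if e = 1 then
        (if lookupD pm best 0 < lookupD pm i 0 then i else best)
      else best) best)
    (Q.headD 0)

-- ===== PORT B =====
def pop_best_alt (Q : List Int) (nm : List (Int × List Int)) (pm : List (Int × Int)) : Int :=
  let ranked := PySem.List.sorted (Q.filter (fun i => (lookupD nm i []).contains 1))
                  (fun x => -(lookupD pm x 0)) false
  match ranked with
  | [] => Q.headD 0
  | r :: _ => if lookupD pm (Q.headD 0) 0 < lookupD pm r 0 then r else Q.headD 0

-- ===== PRECONDITION & SPEC =====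
-- Pre_ excludes exactly the inputs on which A raises: empty Q (IndexError), a node of Q
-- missing from nm (KeyError), and — when some row of a node of Q contains a 1, so that
-- comparisons happen — Q[0] or such a node missing from pm (KeyError).
def Pre_pop_best (Q : List Int) (nm : List (Int × List Int)) (pm : List (Int × Int)) : Prop :=
  Q ≠ [] ∧ (∀ i ∈ Q, (nm.lookup i).isSome) ∧
    ((∃ i ∈ Q, 1 ∈ lookupD nm i []) →
      (pm.lookup (Q.headD 0)).isSome ∧ ∀ i ∈ Q, 1 ∈ lookupD nm i [] → (pm.lookup i).isSome)
instance (Q : List Int) (nm : List (Int × List Int)) (pm : List (Int × Int)) : Decidable (Pre_pop_best Q nm pm) := by unfold Pre_pop_best; infer_instance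
def pvWitness_pop_best : List Int × (List (Int × List Int)) × (List (Int × Int)) :=
  ([1, 2], [(1, [1]), (2, [0])], [(1, 5), (2, 7)])

def Spec_pop_best (Q : List Int) (nm : List (Int × List Int)) (pm : List (Int × Int)) (out : Int) : Prop := out = pop_best_alt Q nm pm
instance (Q : List Int) (nm : List (Int × List Int)) (pm : List (Int × Int)) (out : Int) : Decidable (Spec_pop_best Q nm pm out) := by unfold Spec_pop_best; infer_instance

-- ===== CLAIM (what is proved, stated in full; the proofs are below) =====
def Claim_equal_pop_best : Prop := ∀ (Q : List Int) (nm : List (Int × List Int)) (pm : List (Int × Int)), Dom_pop_best Q nm pm → Pre_pop_best Q nm pm → Spec_pop_best Q nm pm (pop_best Q nm pm)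

-- ===== LEMMAS AND PROOFS =====

-- A's inner loop over one row: it promotes best to i iff the row contains a 1 and i beats best
lemma inner_row (key : Int → Int) (i b : Int) (row : List Int) :
    row.foldl (fun best e => if e = 1 then (if key best < key i then i else best) else best) b
      = if 1 ∈ row ∧ key b < key i then i else b := by
  induction row generalizing b with
  | nil => simp
  | cons e t ih =>
    simp only [List.foldl_cons, List.mem_cons]
    by_cases he : e = 1
    · subst he
      by_cases hb : key b < key i
      · simp only [if_pos hb, ih]
        simp [hb]
      · simp only [if_neg hb, ih]
        simp [hb]
    · have hne : (1 : Int) ≠ e := fun h => he h.symm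
      simp only [if_neg he, ih]
      simp [hne]

-- a guarded running max over Q equals the unguarded running max over the filtered list
lemma fold_filter (key : Int → Int) (c : Int → Bool) (Q : List Int) (s : Int) :
    Q.foldl (fun b i => if c i ∧ key b < key i then i else b) s
      = (Q.filter c).foldl (fun b i => if key b < key i then i else b) s := by
  induction Q generalizing s with
  | nil => rfl
  | cons i t ih =>
    by_cases hc : c i <;> simp [hc, ih]

-- the running max seeded with s over c :: t equals the running max over t seeded with c,
-- adopted only when it strictly beats s
lemma rmax_seed (key : Int → Int) (t : List Int) : ∀ (s c : Int),
    List.foldl (fun b i => if key b < key i then i else b) s (c :: t)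
      = (if key s < key (List.foldl (fun b i => if key b < key i then i else b) c t)
          then List.foldl (fun b i => if key b < key i then i else b) c t else s) := by
  induction t with
  | nil => intro s c; simp
  | cons d t ih =>
    intro s c
    have h1 := ih (if key s < key c then c else s) d
    have h2 := ih c d
    simp only [List.foldl_cons] at h1 h2 ⊢
    rw [h1, h2]
    split_ifs <;> omega

-- head of insertBy: the new element takes the head only if strictly before it
lemma headD_insertBy (lt : Int → Int → Bool) (x d : Int) (acc : List Int) (h : acc ≠ []) :
    (PySem.List.insertBy lt x acc).headD d
      = (if lt x (acc.headD d) then x else acc.headD d) := by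
  cases acc with
  | nil => exact absurd rfl h
  | cons y ys => by_cases hx : lt x y <;> simp [PySem.List.insertBy, hx]

lemma insertBy_ne_nil (lt : Int → Int → Bool) (x : Int) (acc : List Int) :
    PySem.List.insertBy lt x acc ≠ [] := by
  cases acc with
  | nil => simp [PySem.List.insertBy]
  | cons y ys => by_cases hx : lt x y <;> simp [PySem.List.insertBy, hx]

-- head of the insertion-sort fold: the running first-minimum of the key
lemma headD_foldl_insertBy (key : Int → Int) (d : Int) (xs : List Int) : ∀ (acc : List Int), acc ≠ [] →
    ((xs.foldl (fun acc x => PySem.List.insertBy (fun a b => decide (key a < key b)) x acc) acc).headD d)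
      = xs.foldl (fun m x => if key x < key m then x else m) (acc.headD d) := by
  induction xs with
  | nil => intro acc _; rfl
  | cons x t ih =>
    intro acc h
    simp only [List.foldl_cons]
    rw [ih _ (insertBy_ne_nil _ _ _), headD_insertBy _ _ _ _ h]
    by_cases hx : key x < key (acc.headD d) <;> simp_all

-- head of the sorted candidate list: the first key-minimal element
lemma sorted_headD (key : Int → Int) (d c : Int) (t : List Int) :
    (PySem.List.sorted (c :: t) key false).headD d
      = t.foldl (fun m x => if key x < key m then x else m) c := by
  rw [PySem.List.sorted_eq_foldl_insertBy]
  simp only [List.foldl_cons]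
  rw [headD_foldl_insertBy key d t (PySem.List.insertBy _ c []) (insertBy_ne_nil _ _ _)]
  simp [PySem.List.insertBy]

-- ===== VERDICT (by name: the statement is the Claim_ definition above) =====
theorem pop_best_spec : Claim_equal_pop_best := by
  intro Q nm pm _ _
  unfold Spec_pop_best pop_best pop_best_alt
  simp only []
  have h1 : ∀ (b i : Int),
      (lookupD nm i []).foldl (fun best e =>
        if e = 1 then (if lookupD pm best 0 < lookupD pm i 0 then i else best) else best) b
        = if ((lookupD nm i []).contains 1 : Bool) ∧ lookupD pm b 0 < lookupD pm i 0 then i else b := by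
    intro b i
    have h := inner_row (fun x => lookupD pm x 0) i b (lookupD nm i [])
    simp only at h
    rw [h]
    simp
  calc Q.foldl (fun best i =>
        (lookupD nm i []).foldl (fun best e =>
          if e = 1 then (if lookupD pm best 0 < lookupD pm i 0 then i else best) else best) best)
        (Q.headD 0)
      = Q.foldl (fun b i =>
          if ((lookupD nm i []).contains 1 : Bool) ∧ lookupD pm b 0 < lookupD pm i 0 then i else b)
          (Q.headD 0) := by
        apply PySem.List.foldl_congr_mem
        intro b i _
        exact h1 b i
    _ = (Q.filter (fun i => (lookupD nm i []).contains 1)).foldl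
          (fun b i => if lookupD pm b 0 < lookupD pm i 0 then i else b) (Q.headD 0) := by
        have h := fold_filter (fun x => lookupD pm x 0) (fun i => (lookupD nm i []).contains 1) Q (Q.headD 0)
        simp only at h
        rw [h]
    _ = _ := by
        rcases hc : Q.filter (fun i => (lookupD nm i []).contains 1) with _ | ⟨c, t⟩
        · simp [PySem.List.sorted_eq_foldl_insertBy]
        · have hseed := rmax_seed (fun x => lookupD pm x 0) t (Q.headD 0) c
          simp only at hseed
          rw [hseed]
          have hhead := sorted_headD (fun x => -(lookupD pm x 0)) 0 c t
          have hfold : t.foldl (fun m x => if -(lookupD pm x 0) < -(lookupD pm m 0) then x else m) c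
              = t.foldl (fun b i => if lookupD pm b 0 < lookupD pm i 0 then i else b) c := by
            simp only [neg_lt_neg_iff]
          simp only at hhead
          rw [hfold] at hhead
          rcases hr : PySem.List.sorted (c :: t) (fun x => -(lookupD pm x 0)) false with _ | ⟨r, rest⟩
          · rw [PySem.List.sorted_eq_foldl_insertBy] at hr
            exact absurd hr (by simp only [List.foldl_cons]; exact
              (by
                have : ∀ (xs acc : List Int), acc ≠ [] →
                    xs.foldl (fun acc x => PySem.List.insertBy (fun a b => decide (-(lookupD pm a 0) < -(lookupD pm b 0))) x acc) acc ≠ [] := by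
                  intro xs
                  induction xs with
                  | nil => intro acc h; exact h
                  | cons x t ih => intro acc h; exact ih _ (insertBy_ne_nil _ _ _)
                exact this t _ (insertBy_ne_nil _ _ _)))
          · have : r = t.foldl (fun b i => if lookupD pm b 0 < lookupD pm i 0 then i else b) c := by
              rw [hr] at hhead; simpa using hhead
            rw [this]
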